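-- pv_equiv track=rewrite | github.com/christopherwiraputra/AI-presentation-generator | backend/main.py | determine_theme
-- ===== SOURCE A (Python) =====
-- def determine_theme(keyword: str) -> str:
--     keyword = keyword.lower().strip()
--     education_words = ["university", "college", "school", "institute", "academy"]
--     technical_words = ["machine", "learning", "ai", "data", "science", "algorithm", "compute", "cloud"]
--     finance_words = ["finance", "investment", "economics", "stock", "market", "business"]
--     food_words = ["food", "cook", "cooking", "recipe", "sweet potato", "vegetable", "fruit"]
--     nature_words = ["forest", "mountain", "river", "city", "park", "nature", "travel"]
--     soft_topics = ["psychology", "mental", "philosophy", "art", "history", "culture"]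
--     color_words = ["red", "blue", "green", "purple", "orange", "yellow", "brown", "black"]
--
--     if any(w in keyword for w in education_words):
--         return "structure=blue!80!black"
--     if any(w in keyword for w in technical_words):
--         return "structure=blue!70!black"
--     if any(w in keyword for w in finance_words):
--         return "structure=blue!90!black"
--     if any(w in keyword for w in food_words):
--         return "structure=orange!80!black"
--     if any(w in keyword for w in nature_words):
--         return "structure=green!50!black"
--     if any(w in keyword for w in soft_topics):
--         return "structure=purple!70!black"
--     for c in color_words:
--         if c in keyword:
--             return f"structure={c}"
--     return "beaver"
-- ===== SOURCE B (Python) =====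
-- # Inverted matching: enumerate substrings of the keyword (length <= 12) and hash-look
-- # them up in a word->priority table, keeping the best (smallest) priority found.
-- TABLE = [
--     ("university", "structure=blue!80!black"), ("college", "structure=blue!80!black"),
--     ("school", "structure=blue!80!black"), ("institute", "structure=blue!80!black"),
--     ("academy", "structure=blue!80!black"),
--     ("machine", "structure=blue!70!black"), ("learning", "structure=blue!70!black"),
--     ("ai", "structure=blue!70!black"), ("data", "structure=blue!70!black"),
--     ("science", "structure=blue!70!black"), ("algorithm", "structure=blue!70!black"),
--     ("compute", "structure=blue!70!black"), ("cloud", "structure=blue!70!black"),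
--     ("finance", "structure=blue!90!black"), ("investment", "structure=blue!90!black"),
--     ("economics", "structure=blue!90!black"), ("stock", "structure=blue!90!black"),
--     ("market", "structure=blue!90!black"), ("business", "structure=blue!90!black"),
--     ("food", "structure=orange!80!black"), ("cook", "structure=orange!80!black"),
--     ("cooking", "structure=orange!80!black"), ("recipe", "structure=orange!80!black"),
--     ("sweet potato", "structure=orange!80!black"), ("vegetable", "structure=orange!80!black"),
--     ("fruit", "structure=orange!80!black"),
--     ("forest", "structure=green!50!black"), ("mountain", "structure=green!50!black"),
--     ("river", "structure=green!50!black"), ("city", "structure=green!50!black"),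
--     ("park", "structure=green!50!black"), ("nature", "structure=green!50!black"),
--     ("travel", "structure=green!50!black"),
--     ("psychology", "structure=purple!70!black"), ("mental", "structure=purple!70!black"),
--     ("philosophy", "structure=purple!70!black"), ("art", "structure=purple!70!black"),
--     ("history", "structure=purple!70!black"), ("culture", "structure=purple!70!black"),
--     ("red", "structure=red"), ("blue", "structure=blue"), ("green", "structure=green"),
--     ("purple", "structure=purple"), ("orange", "structure=orange"),
--     ("yellow", "structure=yellow"), ("brown", "structure=brown"),
--     ("black", "structure=black"),
-- ]
-- RANK = {w: i for i, (w, _) in enumerate(TABLE)}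
--
--
-- def determine_theme(keyword: str) -> str:
--     k = keyword.lower().strip()
--     n = len(k)
--     best = None
--     for i in range(n):
--         for j in range(i + 1, min(i + 12, n) + 1):
--             r = RANK.get(k[i:j])
--             if r is not None and (best is None or r < best):
--                 best = r
--     return "beaver" if best is None else TABLE[best][1]
-- ===== Notes on version B (the rewrite author's own statement) =====
-- stated objective: alternative
-- what changed: Inverts the matching direction: instead of running a substring search for each category word over the keyword, B enumerates every substring of the keyword of length at most 12 and looks it up in a precomputed word-to-priority hash map, keeping the minimum-priority hit and returning its theme (or the default beaver).
import Mathlib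
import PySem

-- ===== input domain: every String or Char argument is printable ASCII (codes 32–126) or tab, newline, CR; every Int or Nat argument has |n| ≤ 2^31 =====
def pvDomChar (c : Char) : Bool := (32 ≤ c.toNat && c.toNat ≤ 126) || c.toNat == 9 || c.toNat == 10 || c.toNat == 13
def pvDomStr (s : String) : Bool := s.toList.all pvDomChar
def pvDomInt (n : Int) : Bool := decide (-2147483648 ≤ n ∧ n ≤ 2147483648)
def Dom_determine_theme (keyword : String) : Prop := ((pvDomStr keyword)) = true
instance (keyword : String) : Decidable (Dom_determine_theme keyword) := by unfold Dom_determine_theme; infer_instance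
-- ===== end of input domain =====

-- B inverts the matching direction: it enumerates the keyword's substrings of length ≤ 12 and looks
-- them up in a word→priority map, keeping the minimum-priority hit (objective: alternative).

-- ===== PORT A =====
def pvEducationWords : List String := ["university", "college", "school", "institute", "academy"]
def pvTechnicalWords : List String := ["machine", "learning", "ai", "data", "science", "algorithm", "compute", "cloud"]
def pvFinanceWords : List String := ["finance", "investment", "economics", "stock", "market", "business"]
def pvFoodWords : List String := ["food", "cook", "cooking", "recipe", "sweet potato", "vegetable", "fruit"]
def pvNatureWords : List String := ["forest", "mountain", "river", "city", "park", "nature", "travel"]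
def pvSoftTopics : List String := ["psychology", "mental", "philosophy", "art", "history", "culture"]
def pvColorWords : List String := ["red", "blue", "green", "purple", "orange", "yellow", "brown", "black"]

-- A's final 'for c in color_words' loop
def pvColorLoop (k : String) : List String → String
  | [] => "beaver"
  | c :: cs => if PySem.Str.isIn c k then "structure=" ++ c else pvColorLoop k cs

def determine_theme (keyword : String) : String :=
  let k := PySem.Str.strip (PySem.Str.lower keyword)
  if pvEducationWords.any (fun w => PySem.Str.isIn w k) then "structure=blue!80!black"
  else if pvTechnicalWords.any (fun w => PySem.Str.isIn w k) then "structure=blue!70!black"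
  else if pvFinanceWords.any (fun w => PySem.Str.isIn w k) then "structure=blue!90!black"
  else if pvFoodWords.any (fun w => PySem.Str.isIn w k) then "structure=orange!80!black"
  else if pvNatureWords.any (fun w => PySem.Str.isIn w k) then "structure=green!50!black"
  else if pvSoftTopics.any (fun w => PySem.Str.isIn w k) then "structure=purple!70!black"
  else pvColorLoop k pvColorWords

-- ===== PORT B =====
-- Source B's TABLE constant (word, theme), in priority order
def pvTable : List (String × String) := [
  ("university", "structure=blue!80!black"), ("college", "structure=blue!80!black"),
  ("school", "structure=blue!80!black"), ("institute", "structure=blue!80!black"),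
  ("academy", "structure=blue!80!black"),
  ("machine", "structure=blue!70!black"), ("learning", "structure=blue!70!black"),
  ("ai", "structure=blue!70!black"), ("data", "structure=blue!70!black"),
  ("science", "structure=blue!70!black"), ("algorithm", "structure=blue!70!black"),
  ("compute", "structure=blue!70!black"), ("cloud", "structure=blue!70!black"),
  ("finance", "structure=blue!90!black"), ("investment", "structure=blue!90!black"),
  ("economics", "structure=blue!90!black"), ("stock", "structure=blue!90!black"),
  ("market", "structure=blue!90!black"), ("business", "structure=blue!90!black"),
  ("food", "structure=orange!80!black"), ("cook", "structure=orange!80!black"),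
  ("cooking", "structure=orange!80!black"), ("recipe", "structure=orange!80!black"),
  ("sweet potato", "structure=orange!80!black"), ("vegetable", "structure=orange!80!black"),
  ("fruit", "structure=orange!80!black"),
  ("forest", "structure=green!50!black"), ("mountain", "structure=green!50!black"),
  ("river", "structure=green!50!black"), ("city", "structure=green!50!black"),
  ("park", "structure=green!50!black"), ("nature", "structure=green!50!black"),
  ("travel", "structure=green!50!black"),
  ("psychology", "structure=purple!70!black"), ("mental", "structure=purple!70!black"),
  ("philosophy", "structure=purple!70!black"), ("art", "structure=purple!70!black"),
  ("history", "structure=purple!70!black"), ("culture", "structure=purple!70!black"),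
  ("red", "structure=red"), ("blue", "structure=blue"), ("green", "structure=green"),
  ("purple", "structure=purple"), ("orange", "structure=orange"),
  ("yellow", "structure=yellow"), ("brown", "structure=brown"),
  ("black", "structure=black")]

-- Source B's RANK = {w: i for i, (w, _) in enumerate(TABLE)}
def pvRank : PySem.Dict String Int :=
  (PySem.List.enumerate pvTable).foldl (fun d p => d.insert p.2.1 p.1) PySem.Dict.empty

def determine_theme_alt (keyword : String) : String :=
  let k := PySem.Str.strip (PySem.Str.lower keyword)
  let n := PySem.Str.len k
  let best := (PySem.List.pyRange 0 n 1).foldl (fun best i =>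
    (PySem.List.pyRange (i + 1) (min (i + 12) n + 1) 1).foldl (fun best j =>
      match PySem.Dict.get? pvRank (PySem.Str.slice k (some i) (some j)) with
      | none => best
      | some r =>
        match best with
        | none => some r
        | some b => if r < b then some r else some b) best) none
  match best with
  | none => "beaver"
  | some r =>
    -- TABLE[best][1]; best is produced by RANK lookups, hence always a valid index
    match PySem.List.pyGet? pvTable r with
    | some p => p.2
    | none => ""

-- ===== PRECONDITION & SPEC =====
def Spec_determine_theme (keyword : String) (out : String) : Prop := out = determine_theme_alt keyword
instance (keyword : String) (out : String) : Decidable (Spec_determine_theme keyword out) := by unfold Spec_determine_theme; infer_instance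

-- ===== CLAIM (what is proved, stated in full; the proofs are below) =====
def Claim_equal_determine_theme : Prop := ∀ (keyword : String), Dom_determine_theme keyword → Spec_determine_theme keyword (determine_theme keyword)

-- ===== LEMMAS AND PROOFS =====

-- first-match scan over a (word, theme) table: the common form both ports are reduced to
def pvTableScan (k : String) : List (String × String) → String
  | [] => "beaver"
  | (w, t) :: rest => if PySem.Str.isIn w k then t else pvTableScan k rest

-- scanning a constant-theme block equals the any() test for that block
theorem pvTableScan_map_const (k t : String) (ws : List String) (rest : List (String × String)) :
    pvTableScan k (ws.map (fun w => (w, t)) ++ rest)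
      = if ws.any (fun w => PySem.Str.isIn w k) then t else pvTableScan k rest := by
  induction ws with
  | nil => simp only [List.map_nil, List.nil_append, List.any_nil, Bool.false_eq_true, if_false]
  | cons w ws ih =>
    simp only [List.map_cons, List.cons_append, pvTableScan, ih]
    cases hb : PySem.Str.isIn w k <;>
      simp only [hb, List.any_cons, Bool.false_or, Bool.true_or, Bool.false_eq_true, if_false, if_true]

-- scanning the color tail equals A's color loop
theorem pvTableScan_colors (k : String) (cs : List String) :
    pvTableScan k (cs.map (fun c => (c, "structure=" ++ c))) = pvColorLoop k cs := by
  induction cs with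
  | nil => simp [pvTableScan, pvColorLoop]
  | cons c cs ih => simp only [List.map_cons, pvTableScan, pvColorLoop, ih]

theorem pvTable_eq :
    pvTable = (pvEducationWords.map (fun w => (w, "structure=blue!80!black")))
      ++ ((pvTechnicalWords.map (fun w => (w, "structure=blue!70!black")))
      ++ ((pvFinanceWords.map (fun w => (w, "structure=blue!90!black")))
      ++ ((pvFoodWords.map (fun w => (w, "structure=orange!80!black")))
      ++ ((pvNatureWords.map (fun w => (w, "structure=green!50!black")))
      ++ ((pvSoftTopics.map (fun w => (w, "structure=purple!70!black")))
      ++ (pvColorWords.map (fun c => (c, "structure=" ++ c)))))))) := by decide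

-- A is the first-match scan of the flat table
theorem pvA_eq_scan (keyword : String) :
    determine_theme keyword = pvTableScan (PySem.Str.strip (PySem.Str.lower keyword)) pvTable := by
  rw [pvTable_eq]
  unfold determine_theme
  simp only [pvTableScan_map_const, pvTableScan_colors]

theorem pvScan_beaver (k : String) (ts : List (String × String))
    (h : ∀ p ∈ ts, PySem.Str.isIn p.1 k = false) : pvTableScan k ts = "beaver" := by
  induction ts with
  | nil => rfl
  | cons p rest ih =>
    obtain ⟨w, t⟩ := p
    have hw := h (w, t) (List.mem_cons_self)
    simp only [pvTableScan, hw, Bool.false_eq_true, if_false]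
    exact ih (fun q hq => h q (List.mem_cons_of_mem _ hq))

theorem pvScan_first (k : String) (ts : List (String × String)) (m : Nat) (hm : m < ts.length)
    (hp : PySem.Str.isIn ts[m].1 k = true)
    (hmin : ∀ j (hj : j < m), PySem.Str.isIn (ts[j]'(Nat.lt_trans hj hm)).1 k = false) :
    pvTableScan k ts = ts[m].2 := by
  induction ts generalizing m with
  | nil => exact absurd hm (Nat.not_lt_zero m)
  | cons p rest ih =>
    obtain ⟨w, t⟩ := p
    cases m with
    | zero =>
      simp only [List.getElem_cons_zero] at hp ⊢
      simp only [pvTableScan, hp]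
      rfl
    | succ m =>
      have h0 := hmin 0 (Nat.succ_pos m)
      simp only [List.getElem_cons_zero] at h0
      simp only [List.getElem_cons_succ] at hp ⊢
      simp only [pvTableScan, h0, Bool.false_eq_true, if_false]
      exact ih m (Nat.lt_of_succ_lt_succ hm) hp
        (fun j hj => by
          have := hmin (j + 1) (Nat.succ_lt_succ hj)
          simpa using this)

-- the min-accumulator step of B's loop
def pvMinStep (b : Option Int) (r : Int) : Option Int :=
  match b with
  | none => some r
  | some a => if r < a then some r else some a

theorem pvMinStep_some (a r : Int) : pvMinStep (some a) r = some (min a r) := by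
  show (if r < a then some r else some a) = some (min a r)
  by_cases h : r < a
  · rw [if_pos h, min_eq_right h.le]
  · rw [if_neg h, min_eq_left (not_lt.mp h)]

theorem pvFoldl_minStep_some (l : List Int) (a : Int) :
    List.foldl pvMinStep (some a) l = some (List.foldl min a l) := by
  induction l generalizing a with
  | nil => rfl
  | cons x t ih => rw [List.foldl_cons, pvMinStep_some, ih, List.foldl_cons]

theorem pvFoldl_minStep_eq_min? (l : List Int) :
    List.foldl pvMinStep none l = l.min? := by
  cases l with
  | nil => rfl
  | cons x t =>
    rw [List.foldl_cons]
    show List.foldl pvMinStep (some x) t = _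
    rw [pvFoldl_minStep_some]
    rfl

-- the multiset of priorities hit by B's double loop
def pvHits (k : String) : List Int :=
  (PySem.List.pyRange 0 (PySem.Str.len k) 1).flatMap (fun i =>
    (PySem.List.pyRange (i + 1) (min (i + 12) (PySem.Str.len k) + 1) 1).filterMap (fun j =>
      PySem.Dict.get? pvRank (PySem.Str.slice k (some i) (some j))))

theorem pvBestFold_eq (k : String) :
    (PySem.List.pyRange 0 (PySem.Str.len k) 1).foldl (fun best i =>
      (PySem.List.pyRange (i + 1) (min (i + 12) (PySem.Str.len k) + 1) 1).foldl (fun best j =>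
        match PySem.Dict.get? pvRank (PySem.Str.slice k (some i) (some j)) with
        | none => best
        | some r =>
          match best with
          | none => some r
          | some b => if r < b then some r else some b) best) none
      = (pvHits k).min? := by
  rw [← pvFoldl_minStep_eq_min?]
  unfold pvHits
  rw [List.foldl_flatMap]
  apply PySem.List.foldl_congr_mem
  intro acc i _
  rw [List.foldl_filterMap]
  apply PySem.List.foldl_congr_mem
  intro b j _
  cases PySem.Dict.get? pvRank (PySem.Str.slice k (some i) (some j)) with
  | none => rfl
  | some r => cases b <;> rfl

set_option maxRecDepth 100000 in
theorem pvRank_items :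
    pvRank.items = (PySem.List.enumerate pvTable).map (fun p => (p.2.1, p.1)) := by decide

set_option maxRecDepth 100000 in
theorem pvRank_nodup : pvRank.keys.Nodup := by decide

theorem pvRank_get (s : String) (r : Int) :
    pvRank.get? s = some r ↔
      ∃ (m : Nat) (h : m < pvTable.length), r = (m : Int) ∧ pvTable[m].1 = s := by
  rw [PySem.Dict.get?_eq_some_iff_mem_items _ _ _ pvRank_nodup, pvRank_items, List.mem_map]
  constructor
  · rintro ⟨q, hq, hmap⟩
    rw [PySem.List.mem_enumerate_iff] at hq
    obtain ⟨m, hm, rfl⟩ := hq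
    refine ⟨m, hm, ?_, ?_⟩
    · have := congrArg Prod.snd hmap; simpa using this.symm
    · have := congrArg Prod.fst hmap; simpa using this
  · rintro ⟨m, hm, rfl, hs⟩
    refine ⟨((m : Int), pvTable[m]), ?_, ?_⟩
    · rw [PySem.List.mem_enumerate_iff]; exact ⟨m, hm, by simp⟩
    · simp [hs]

theorem pvWord_len : ∀ p ∈ pvTable, 1 ≤ p.1.toList.length ∧ p.1.toList.length ≤ 12 := by decide

theorem pvMem_hits (k : String) (r : Int) :
    r ∈ pvHits k ↔
      ∃ (m : Nat) (h : m < pvTable.length), r = (m : Int) ∧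
        PySem.Str.isIn pvTable[m].1 k = true := by
  unfold pvHits
  simp only [List.mem_flatMap, List.mem_filterMap, PySem.List.mem_pyRange_one,
    PySem.Str.len_eq]
  constructor
  · rintro ⟨i, ⟨hi0, hin⟩, j, ⟨hj1, hj2⟩, hget⟩
    obtain ⟨m, hm, rfl, hw⟩ := (pvRank_get _ r).mp hget
    refine ⟨m, hm, rfl, ?_⟩
    rw [PySem.Str.isIn_iff_infix, hw, PySem.Str.toList_slice,
      PySem.Chars.slice_eq_listSlice,
      PySem.List.slice_toNat _ hi0 (le_trans (by omega) hj1)]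
    exact ((List.take_prefix _ _).isInfix).trans ((List.drop_suffix _ _).isInfix)
  · rintro ⟨m, hm, rfl, hw⟩
    have hlen := pvWord_len pvTable[m] (List.getElem_mem hm)
    have hchars : PySem.Chars.isIn pvTable[m].1.toList k.toList = true := by
      rw [PySem.Chars.isIn_iff_infix]
      exact (PySem.Str.isIn_iff_infix _ _).mp hw
    obtain ⟨i, hpre⟩ :=
      (PySem.Chars.exists_prefix_drop_iff_isIn pvTable[m].1.toList k.toList).mpr hchars
    have hle : pvTable[m].1.toList.length ≤ k.toList.length - i := by
      simpa using hpre.length_le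
    have h1 : 1 ≤ pvTable[m].1.toList.length := hlen.1
    have h12 : pvTable[m].1.toList.length ≤ 12 := hlen.2
    have hiN : i < k.toList.length := by omega
    have hiwN : i + pvTable[m].1.toList.length ≤ k.toList.length := by omega
    refine ⟨(i : Int), ⟨by omega, by omega⟩,
      (i : Int) + (pvTable[m].1.toList.length : Int), ⟨by omega, by omega⟩, ?_⟩
    refine (pvRank_get _ _).mpr ⟨m, hm, rfl, ?_⟩
    have hslice : (PySem.Str.slice k (some (i : Int))
        (some ((i : Int) + (pvTable[m].1.toList.length : Int)))).toList
        = pvTable[m].1.toList := by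
      rw [PySem.Str.toList_slice, PySem.Chars.slice_eq_listSlice,
        PySem.List.slice_natCast_add]
      exact (List.prefix_iff_eq_take.mp hpre).symm
    exact (String.toList_inj.mp hslice).symm

-- B is the theme at the minimum hit, hence also the first-match scan
theorem pvB_eq_scan (keyword : String) :
    determine_theme_alt keyword
      = pvTableScan (PySem.Str.strip (PySem.Str.lower keyword)) pvTable := by
  simp only [determine_theme_alt]
  rw [pvBestFold_eq]
  cases hmin : (pvHits (PySem.Str.strip (PySem.Str.lower keyword))).min? with
  | none =>
    refine (pvScan_beaver _ _ ?_).symm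
    intro p hp
    by_contra hb
    rw [Bool.not_eq_false] at hb
    obtain ⟨m, hm, hpm⟩ := List.mem_iff_getElem.mp hp
    have : ((m : Int)) ∈ pvHits (PySem.Str.strip (PySem.Str.lower keyword)) :=
      (pvMem_hits _ _).mpr ⟨m, hm, rfl, by rw [hpm]; exact hb⟩
    rw [List.min?_eq_none_iff.mp hmin] at this
    exact absurd this (List.not_mem_nil)
  | some r =>
    obtain ⟨m, hm, rfl, hw⟩ := (pvMem_hits _ r).mp (List.min?_mem hmin)
    have hle : ∀ x ∈ pvHits (PySem.Str.strip (PySem.Str.lower keyword)), (m : Int) ≤ x :=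
      (List.le_min?_iff hmin).mp le_rfl
    have hmins : ∀ j (hj : j < m),
        PySem.Str.isIn (pvTable[j]'(Nat.lt_trans hj hm)).1
          (PySem.Str.strip (PySem.Str.lower keyword)) = false := by
      intro j hj
      by_contra hb
      rw [Bool.not_eq_false] at hb
      have hjmem : ((j : Int)) ∈ pvHits (PySem.Str.strip (PySem.Str.lower keyword)) :=
        (pvMem_hits _ _).mpr ⟨j, Nat.lt_trans hj hm, rfl, hb⟩
      have := hle _ hjmem
      omega
    rw [pvScan_first _ pvTable m hm hw hmins]
    show (match PySem.List.pyGet? pvTable ((m : Nat) : Int) with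
      | some p => p.2
      | none => "") = pvTable[m].2
    rw [PySem.List.pyGet?_natCast, List.getElem?_eq_getElem hm]

-- ===== VERDICT (by name: the statement is the Claim_ definition above) =====
theorem determine_theme_spec : Claim_equal_determine_theme := by
  intro keyword _
  unfold Spec_determine_theme
  rw [pvA_eq_scan, pvB_eq_scan]
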